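-- pv_equiv track=rewrite | github.com/GasumSam/Kata_02 | cromanos.py | __descomponer
-- ===== SOURCE A (Python) =====
-- def __descomponer(numero):  #Al convertir a objeto, hago privado el atributo descomponer (__)
--
--     res = []
--     for orden in range(3, 0, -1):
--         resto = numero % 10 ** orden
--         res.append(numero - resto)
--         numero = resto
--     res.append(numero)
--     return res
-- ===== SOURCE B (Python) =====
-- def __descomponer(numero):
--     # Bottom-up digit extraction: repeated divmod by 10 builds the slots
--     # back-to-front (units, tens, hundreds), then the remaining quotient
--     # scaled by 1000; reversed at the end.
--     res = []
--     mult = 1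
--     for _ in range(3):
--         numero, digito = divmod(numero, 10)
--         res.append(digito * mult)
--         mult *= 10
--     res.append(numero * 1000)
--     res.reverse()
--     return res
-- ===== Notes on version B (the rewrite author's own statement) =====
-- stated objective: alternative
-- what changed: Replaced A's top-down subtract-the-remainder loop over decreasing powers of ten by bottom-up repeated divmod-by-10 digit extraction that builds the list back-to-front and reverses it.
import Mathlib
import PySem

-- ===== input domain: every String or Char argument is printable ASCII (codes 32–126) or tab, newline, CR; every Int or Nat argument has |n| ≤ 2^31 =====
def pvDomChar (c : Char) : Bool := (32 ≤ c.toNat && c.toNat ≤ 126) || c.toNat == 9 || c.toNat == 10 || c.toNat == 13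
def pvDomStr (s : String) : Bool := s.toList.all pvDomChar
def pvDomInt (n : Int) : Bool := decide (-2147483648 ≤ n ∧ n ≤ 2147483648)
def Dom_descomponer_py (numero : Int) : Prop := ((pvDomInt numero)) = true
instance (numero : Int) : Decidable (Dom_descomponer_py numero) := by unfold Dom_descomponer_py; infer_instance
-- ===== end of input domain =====

-- B extracts digits bottom-up with repeated divmod by 10 and reverses, instead of A's top-down subtract-the-remainder loop (objective: alternative).


-- ===== PORT A =====
-- Loop 'for orden in range(3, 0, -1)' as a foldl over PySem.List.pyRange carrying (res, numero).
def descomponer_py (numero : Int) : List Int :=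
  let st := (PySem.List.pyRange 3 0 (-1)).foldl
    (fun (st : List Int × Int) (orden : Int) =>
      let resto := PySem.Int.mod st.2 (10 ^ orden.toNat)
      (st.1 ++ [st.2 - resto], resto))
    ([], numero)
  st.1 ++ [st.2]

-- ===== PORT B =====
-- Loop 'for _ in range(3)' as a foldl carrying (numero, mult, res); divmod(numero, 10)
-- with positive divisor 10 is (PySem.Int.floordiv, PySem.Int.mod); final reverse.
def descomponer_py_alt (numero : Int) : List Int :=
  let st := (PySem.List.pyRange 0 3 1).foldl
    (fun (st : Int × Int × List Int) (_ : Int) =>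
      let q := PySem.Int.floordiv st.1 10
      let d := PySem.Int.mod st.1 10
      (q, st.2.1 * 10, st.2.2 ++ [d * st.2.1]))
    (numero, 1, [])
  (st.2.2 ++ [st.1 * 1000]).reverse

-- ===== PRECONDITION & SPEC =====
def Spec_descomponer_py (numero : Int) (out : List Int) : Prop := out = descomponer_py_alt numero
instance (numero : Int) (out : List Int) : Decidable (Spec_descomponer_py numero out) := by unfold Spec_descomponer_py; infer_instance

-- ===== CLAIM (what is proved, stated in full; the proofs are below) =====
def Claim_equal_descomponer_py : Prop := ∀ (numero : Int), Dom_descomponer_py numero → Spec_descomponer_py numero (descomponer_py numero)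

-- ===== LEMMAS AND PROOFS =====

-- ===== VERDICT (by name: the statement is the Claim_ definition above) =====
theorem descomponer_py_spec : Claim_equal_descomponer_py := by
  intro n _
  show descomponer_py n = descomponer_py_alt n
  have hA : PySem.List.pyRange 3 0 (-1) = [3, 2, 1] := by decide
  have hB : PySem.List.pyRange 0 3 1 = [0, 1, 2] := by decide
  simp only [descomponer_py, descomponer_py_alt, hA, hB, List.foldl, List.reverse,
    PySem.Int.mod_eq_emod_of_pos (show (0:Int) < 10 by norm_num),
    PySem.Int.floordiv_eq_ediv_of_pos (show (0:Int) < 10 by norm_num)]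
  norm_num [(by decide : (10:Int) ^ Int.toNat 3 = 1000), (by decide : (10:Int) ^ Int.toNat 2 = 100),
    (by decide : (10:Int) ^ Int.toNat 1 = 10), List.cons.injEq]
  omega
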